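-- pv_equiv track=rewrite | github.com/saint2706/Solutions-to-30-Days-Of-Python | tools/build_docs.py | _strip_first_heading
-- ===== SOURCE A (Python) =====
-- def _strip_first_heading(content: str) -> str:
--     lines = content.splitlines()
--     stripped: list[str] = []
--     removed = False
--     for line in lines:
--         if not removed and line.lstrip().startswith("#"):
--             removed = True
--             continue
--         if not removed and not line.strip():
--             # Skip leading blank lines before the first heading is removed
--             continue
--         stripped.append(line)
--     return "\n".join(stripped).lstrip()
-- ===== SOURCE B (Python) =====
-- def _strip_first_heading(content: str) -> str:
--     lines = content.splitlines()
--     idx = next((i for i, l in enumerate(lines) if l.lstrip().startswith("#")), None)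
--     cut = len(lines) if idx is None else idx
--     prefix = [l for l in lines[:cut] if l.strip()]
--     suffix = [] if idx is None else lines[idx + 1:]
--     return "\n".join(prefix + suffix).lstrip()
-- ===== Notes on version B (the rewrite author's own statement) =====
-- stated objective: simpler
-- what changed: Replaces A's single stateful pass carrying a boolean flag by locate-then-slice: find the index of the first heading line, blank-filter the lines before it, keep the lines after it, join and lstrip.
import Mathlib
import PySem

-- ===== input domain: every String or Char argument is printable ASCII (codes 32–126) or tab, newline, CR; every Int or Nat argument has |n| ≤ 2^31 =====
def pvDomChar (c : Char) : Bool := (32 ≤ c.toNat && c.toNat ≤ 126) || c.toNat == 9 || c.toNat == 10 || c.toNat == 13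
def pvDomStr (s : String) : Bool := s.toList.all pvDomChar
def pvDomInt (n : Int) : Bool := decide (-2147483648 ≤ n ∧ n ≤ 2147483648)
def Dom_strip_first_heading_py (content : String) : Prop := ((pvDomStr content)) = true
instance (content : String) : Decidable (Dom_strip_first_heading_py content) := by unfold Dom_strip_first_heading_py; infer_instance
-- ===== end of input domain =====

-- B: locate the first heading line, then slice — blank-filter the pre-heading region and
-- keep everything after the heading — instead of A's one stateful pass with a boolean flag
-- (objective: simpler decomposition, same cost).

-- ===== PORT A =====
-- the loop body of A: state = (stripped, removed)
def pvStepA (acc : List String × Bool) (line : String) : List String × Bool :=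
  if !acc.2 && PySem.Str.startswith (PySem.Str.lstrip line) "#" then (acc.1, true)
  else if !acc.2 && (PySem.Str.strip line == "") then acc
  else (acc.1 ++ [line], acc.2)

def strip_first_heading_py (content : String) : String :=
  let lines := PySem.Str.splitlines content
  let res := lines.foldl pvStepA ([], false)
  PySem.Str.lstrip (PySem.Str.join "\n" res.1)

-- ===== PORT B =====
def strip_first_heading_py_alt (content : String) : String :=
  let lines := PySem.Str.splitlines content
  let idx? := lines.findIdx? (fun l => PySem.Str.startswith (PySem.Str.lstrip l) "#")
  let cut := match idx? with | none => lines.length | some i => i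
  -- lines[:cut] / lines[idx+1:] with nonnegative bounds = take / drop (PySem.List.slice_to_natCast / slice_from_natCast)
  let pre := (lines.take cut).filter (fun l => !(PySem.Str.strip l == ""))
  let suf := match idx? with | none => [] | some i => lines.drop (i + 1)
  PySem.Str.lstrip (PySem.Str.join "\n" (pre ++ suf))

-- ===== PRECONDITION & SPEC =====
def Spec_strip_first_heading_py (content : String) (out : String) : Prop := out = strip_first_heading_py_alt content
instance (content : String) (out : String) : Decidable (Spec_strip_first_heading_py content out) := by unfold Spec_strip_first_heading_py; infer_instance

-- ===== CLAIM (what is proved, stated in full; the proofs are below) =====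
def Claim_equal_strip_first_heading_py : Prop := ∀ (content : String), Dom_strip_first_heading_py content → Spec_strip_first_heading_py content (strip_first_heading_py content)

-- ===== LEMMAS AND PROOFS =====

-- B's line list, as a function of the input lines
def pvBodyB (lines : List String) : List String :=
  let idx? := lines.findIdx? (fun l => PySem.Str.startswith (PySem.Str.lstrip l) "#")
  let cut := match idx? with | none => lines.length | some i => i
  ((lines.take cut).filter (fun l => !(PySem.Str.strip l == ""))) ++
    (match idx? with | none => [] | some i => lines.drop (i + 1))

-- once removed = true, A's loop appends every remaining line
theorem pvLoopA_true (lines : List String) (acc : List String) :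
    lines.foldl pvStepA (acc, true) = (acc ++ lines, true) := by
  induction lines generalizing acc with
  | nil => simp
  | cons l rest ih =>
    simp only [List.foldl_cons, pvStepA]
    simp [ih]

-- while removed = false, A's loop produces exactly B's line list
theorem pvLoopA_false (lines : List String) (acc : List String) :
    (lines.foldl pvStepA (acc, false)).1 = acc ++ pvBodyB lines := by
  induction lines generalizing acc with
  | nil => simp [pvBodyB]
  | cons l rest ih =>
    by_cases hp : PySem.Str.startswith (PySem.Str.lstrip l) "#" = true
    · simp only [List.foldl_cons, pvStepA, hp, Bool.not_false, Bool.true_and, if_true,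
        pvLoopA_true, pvBodyB, List.findIdx?_cons, List.take_zero, List.filter_nil,
        List.nil_append, List.drop_succ_cons, List.drop_zero]
    · have hp' : PySem.Chars.startswith (PySem.Chars.lstrip l.toList) ['#'] = false := by
        simpa using hp
      by_cases hb : (PySem.Str.strip l == "") = true
      · have : (l :: rest).foldl pvStepA (acc, false) = rest.foldl pvStepA (acc, false) := by
          simp [pvStepA, hp', hb]
        rw [this, ih]
        congr 1
        simp only [pvBodyB, List.findIdx?_cons, hp]
        cases hi : rest.findIdx? (fun l => PySem.Str.startswith (PySem.Str.lstrip l) "#") with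
        | none => simp [hb]
        | some i => simp [hb]
      · have : (l :: rest).foldl pvStepA (acc, false) = rest.foldl pvStepA (acc ++ [l], false) := by
          simp [pvStepA, hp', hb]
        rw [this, ih]
        rw [List.append_assoc]
        congr 1
        simp only [pvBodyB, List.findIdx?_cons, hp]
        cases hi : rest.findIdx? (fun l => PySem.Str.startswith (PySem.Str.lstrip l) "#") with
        | none => simp [hb]
        | some i => simp [hb]

-- ===== VERDICT (by name: the statement is the Claim_ definition above) =====
theorem strip_first_heading_py_spec : Claim_equal_strip_first_heading_py := by
  intro content _
  unfold Spec_strip_first_heading_py strip_first_heading_py strip_first_heading_py_alt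
  dsimp only
  rw [pvLoopA_false, List.nil_append, pvBodyB]
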